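-- pv_equiv track=rewrite | github.com/gnezim/thunder-forge | src/thunder_forge/cluster/preflight.py | parse_probe_output
-- ===== SOURCE A (Python) =====
-- def parse_probe_output(output: str) -> dict[str, str]:
--     """Parse key=value pairs from probe script output between delimiters."""
--     result: dict[str, str] = {}
--     in_probe = False
--     for line in output.splitlines():
--         line = line.strip()
--         if line == "@@PROBE_START@@":
--             in_probe = True
--             continue
--         if line == "@@PROBE_END@@":
--             break
--         if in_probe and "=" in line:
--             key, _, value = line.partition("=")
--             result[key] = value
--     return result
-- ===== SOURCE B (Python) =====
-- def parse_probe_output(output: str) -> dict[str, str]: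
--     """Parse key=value pairs from probe script output between delimiters."""
--     lines = [line.strip() for line in output.splitlines()]
--     try:
--         end = lines.index("@@PROBE_END@@")
--     except ValueError:
--         end = len(lines)
--     head = lines[:end]
--     try:
--         start = head.index("@@PROBE_START@@")
--     except ValueError:
--         return {}
--     result: dict[str, str] = {}
--     for line in head[start + 1:]:
--         if "=" in line:
--             key, _, value = line.partition("=")
--             result[key] = value
--     return result
-- ===== Notes on version B (the rewrite author's own statement) =====
-- stated objective: alternative
-- what changed: Replaces the in_probe flag and early break with explicit boundary location: find the first '@@PROBE_END@@' line, find the first '@@PROBE_START@@' within that prefix, then parse only the slice strictly between them.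
import Mathlib
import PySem

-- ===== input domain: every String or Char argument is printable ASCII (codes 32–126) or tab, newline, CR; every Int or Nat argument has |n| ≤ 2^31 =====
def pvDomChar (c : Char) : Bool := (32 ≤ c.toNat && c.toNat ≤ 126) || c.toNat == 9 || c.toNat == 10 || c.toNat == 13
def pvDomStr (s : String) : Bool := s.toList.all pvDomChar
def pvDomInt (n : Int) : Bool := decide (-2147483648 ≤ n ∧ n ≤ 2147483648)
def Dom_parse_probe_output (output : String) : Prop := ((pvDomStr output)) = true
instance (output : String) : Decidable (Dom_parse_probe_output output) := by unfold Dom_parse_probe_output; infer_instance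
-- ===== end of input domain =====

-- B replaces A's in_probe flag + early break by locating the END/START boundary lines and parsing the slice between them; return value equivalence proved for all inputs.


-- shared primitive: line.partition("=") restricted to the (before, after) components
-- (exact: when '=' ∉ line Python gives (line, '', ''), i.e. before = line, after = '')
def pvPartEq (line : String) : String × String :=
  let cs := line.toList
  (String.ofList (cs.takeWhile (· ≠ '=')), String.ofList ((cs.dropWhile (· ≠ '=')).drop 1))

-- ===== PORT A =====
-- the for-loop with in_probe flag, 'continue' on START, 'break' on END
def pvLoopA : List String → PySem.Dict String String → Bool → PySem.Dict String String
  | [], d, _ => d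
  | l :: rest, d, inp =>
    let line := PySem.Str.strip l
    if line = "@@PROBE_START@@" then pvLoopA rest d true
    else if line = "@@PROBE_END@@" then d
    else if inp && PySem.Str.isIn "=" line then
      pvLoopA rest (d.insert (pvPartEq line).1 (pvPartEq line).2) inp
    else pvLoopA rest d inp

def parse_probe_output (output : String) : List (String × String) :=
  (pvLoopA (PySem.Str.splitlines output) PySem.Dict.empty false).items

-- ===== PORT B =====
-- body of B's parsing loop over the slice between the delimiters
def pvIns (d : PySem.Dict String String) (line : String) : PySem.Dict String String :=
  if PySem.Str.isIn "=" line then d.insert (pvPartEq line).1 (pvPartEq line).2 else d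

def parse_probe_output_alt (output : String) : List (String × String) :=
  let lines := (PySem.Str.splitlines output).map PySem.Str.strip
  let endIdx := (PySem.List.index? lines "@@PROBE_END@@").getD lines.length
  let head := lines.take endIdx
  match PySem.List.index? head "@@PROBE_START@@" with
  | none => []
  | some start => ((head.drop (start + 1)).foldl pvIns PySem.Dict.empty).items

-- ===== PRECONDITION & SPEC =====
def Spec_parse_probe_output (output : String) (out : List (String × String)) : Prop := out = parse_probe_output_alt output
instance (output : String) (out : List (String × String)) : Decidable (Spec_parse_probe_output output out) := by unfold Spec_parse_probe_output; infer_instance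

-- ===== CLAIM (what is proved, stated in full; the proofs are below) =====
def Claim_equal_parse_probe_output : Prop := ∀ (output : String), Dom_parse_probe_output output → Spec_parse_probe_output output (parse_probe_output output)

-- ===== LEMMAS AND PROOFS =====

lemma pvIns_start (d : PySem.Dict String String) : pvIns d "@@PROBE_START@@" = d := by
  unfold pvIns
  rw [if_neg (by decide : ¬ (PySem.Str.isIn "=" "@@PROBE_START@@" = true))]

-- taking up to the first occurrence of v is takeWhile (· ≠ v)
lemma take_index?_getD (ls : List String) (v : String) :
    ls.take ((PySem.List.index? ls v).getD ls.length) = ls.takeWhile (· ≠ v) := by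
  induction ls with
  | nil => simp
  | cons x rest ih =>
    by_cases hx : x = v
    · subst hx
      rw [PySem.List.index?_cons_self]
      simp
    · rw [PySem.List.index?_cons_of_ne rest hx]
      cases h : PySem.List.index? rest v with
      | none =>
        simp only [h] at ih
        simp only [Option.map_none, Option.getD_none, List.length_cons,
          List.take_succ_cons, List.takeWhile_cons]
        rw [if_pos (by simpa using hx), List.take_length]
        simpa using ih
      | some k =>
        simp only [h] at ih
        simp only [Option.map_some, Option.getD_some, List.take_succ_cons, List.takeWhile_cons]
        rw [if_pos (by simpa using hx)]
        simpa using ih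

-- in-probe phase of A = B's parsing fold over the stripped lines before the first END
lemma loopA_true (ls : List String) (d : PySem.Dict String String) :
    pvLoopA ls d true =
      ((ls.map PySem.Str.strip).takeWhile (· ≠ "@@PROBE_END@@")).foldl pvIns d := by
  induction ls generalizing d with
  | nil => simp [pvLoopA]
  | cons l rest ih =>
    simp only [pvLoopA, List.map_cons, List.takeWhile_cons]
    by_cases h1 : PySem.Str.strip l = "@@PROBE_START@@"
    · have hne : (decide (PySem.Str.strip l ≠ "@@PROBE_END@@")) = true := by
        rw [h1]; decide
      rw [if_pos h1, hne, if_pos rfl, List.foldl_cons, h1, pvIns_start, ih]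
    · by_cases h2 : PySem.Str.strip l = "@@PROBE_END@@"
      · rw [if_neg h1, if_pos h2]
        simp [h2]
      · have hne : (decide (PySem.Str.strip l ≠ "@@PROBE_END@@")) = true := by
          simpa using h2
        rw [if_neg h1, if_neg h2, hne, if_pos rfl, List.foldl_cons]
        simp only [Bool.true_and]
        by_cases h3 : PySem.Str.isIn "=" (PySem.Str.strip l) = true
        · have h3' : PySem.Chars.isIn ['='] (PySem.Chars.strip l.toList) = true := by
            simpa using h3
          rw [if_pos h3, ih]
          simp [pvIns, h3']
        · have h3' : PySem.Chars.isIn ['='] (PySem.Chars.strip l.toList) = false := by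
            simpa using (Bool.not_eq_true _ |>.mp h3)
          rw [if_neg h3, ih]
          simp [pvIns, h3']

-- B restated on the stripped line list, with the first-END prefix as takeWhile
def pvBmid (lines : List String) : PySem.Dict String String :=
  let head := lines.takeWhile (· ≠ "@@PROBE_END@@")
  match PySem.List.index? head "@@PROBE_START@@" with
  | none => PySem.Dict.empty
  | some start => (head.drop (start + 1)).foldl pvIns PySem.Dict.empty

-- pre-probe phase of A = B
lemma loopA_false (ls : List String) :
    pvLoopA ls PySem.Dict.empty false = pvBmid (ls.map PySem.Str.strip) := by
  induction ls with
  | nil => simp [pvLoopA, pvBmid]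
  | cons l rest ih =>
    simp only [pvLoopA, List.map_cons, pvBmid, List.takeWhile_cons]
    by_cases h1 : PySem.Str.strip l = "@@PROBE_START@@"
    · have hne : (decide (PySem.Str.strip l ≠ "@@PROBE_END@@")) = true := by
        rw [h1]; decide
      rw [if_pos h1, hne, if_pos rfl, h1, PySem.List.index?_cons_self, loopA_true]
      simp
    · by_cases h2 : PySem.Str.strip l = "@@PROBE_END@@"
      · rw [if_neg h1, if_pos h2]
        have hne : (decide (PySem.Str.strip l ≠ "@@PROBE_END@@")) = false := by
          simpa using h2
        rw [hne, if_neg (by simp)]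
        simp
      · have hne : (decide (PySem.Str.strip l ≠ "@@PROBE_END@@")) = true := by
          simpa using h2
        rw [if_neg h1, if_neg h2, hne, if_pos rfl]
        simp only [Bool.false_and, if_neg (by simp : ¬ (false = true))]
        rw [ih]
        simp only [pvBmid]
        rw [PySem.List.index?_cons_of_ne _ h1]
        cases h : PySem.List.index? ((rest.map PySem.Str.strip).takeWhile (· ≠ "@@PROBE_END@@")) "@@PROBE_START@@" with
        | none => simp
        | some k => simp [List.drop_succ_cons]

-- ===== VERDICT (by name: the statement is the Claim_ definition above) =====
theorem parse_probe_output_spec : Claim_equal_parse_probe_output := by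
  intro output _
  unfold Spec_parse_probe_output parse_probe_output parse_probe_output_alt
  rw [loopA_false]
  simp only [take_index?_getD, pvBmid]
  cases h : PySem.List.index?
      (((PySem.Str.splitlines output).map PySem.Str.strip).takeWhile (· ≠ "@@PROBE_END@@"))
      "@@PROBE_START@@" with
  | none => simp [PySem.Dict.empty]
  | some k => simp
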